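-- pv_equiv track=rewrite | github.com/zeozeozeo/odin-imgui | gen_odin.py | strip_imgui_branding
-- ===== SOURCE A (Python) =====
-- _imgui_prefixes = [
-- 	"ImGui",
-- 	"Im",
-- ]
--
-- _imgui_namespaced_prefixes = [
-- 	["ImVector_", "Vector"],
-- 	["ImGuiStorage_", "Storage"],
-- ]
--
-- def strip_imgui_branding(name: str) -> str:
-- 	for namespaced_prefix in _imgui_namespaced_prefixes:
-- 		if name.startswith(namespaced_prefix[0]):
-- 			remainder = name.removeprefix(namespaced_prefix[0])
-- 			return namespaced_prefix[1] + "_" + strip_imgui_branding(remainder)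
--
-- 	for prefix in _imgui_prefixes:
-- 		if name.startswith(prefix):
-- 			return name.removeprefix(prefix)
--
-- 	return name
-- ===== SOURCE B (Python) =====
-- def strip_imgui_branding(name: str) -> str:
--     acc = ""
--     while True:
--         if name.startswith("ImVector_"):
--             acc += "Vector_"
--             name = name[len("ImVector_"):]
--         elif name.startswith("ImGuiStorage_"):
--             acc += "Storage_"
--             name = name[len("ImGuiStorage_"):]
--         else:
--             break
--     if name.startswith("ImGui"):
--         name = name[len("ImGui"):]
--     elif name.startswith("Im"):
--         name = name[len("Im"):]
--     return acc + name
-- ===== Notes on version B (the rewrite author's own statement) =====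
-- stated objective: alternative
-- what changed: Replaces the self-recursive prefix stripper with an iterative while-loop that maintains an accumulator string for the namespaced replacements and performs the single ImGui/Im strip once after the loop.
import Mathlib
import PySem

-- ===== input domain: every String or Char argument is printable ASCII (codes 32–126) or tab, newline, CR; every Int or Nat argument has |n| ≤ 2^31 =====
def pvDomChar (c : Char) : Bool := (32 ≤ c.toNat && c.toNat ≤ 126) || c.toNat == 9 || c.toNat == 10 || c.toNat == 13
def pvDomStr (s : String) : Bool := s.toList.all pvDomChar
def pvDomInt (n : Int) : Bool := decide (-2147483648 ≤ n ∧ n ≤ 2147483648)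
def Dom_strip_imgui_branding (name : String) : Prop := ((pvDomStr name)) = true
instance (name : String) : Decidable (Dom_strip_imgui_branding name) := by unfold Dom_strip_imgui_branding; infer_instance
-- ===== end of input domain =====

-- B replaces A's recursion with an iterative accumulator loop; objective: alternative decomposition (same cost).

-- termination helper: a true startswith of a prefix of length k means the string has ≥ k chars
theorem pvDropLtOfStartswith (cs p : List Char) (h : PySem.Chars.startswith cs p = true)
    (hk : 0 < p.length) : (cs.drop p.length).length < cs.length := by
  have hp := (PySem.Chars.startswith_iff cs p).mp h
  have := hp.length_le
  simp [List.length_drop]; omega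

-- ===== PORT A =====
-- A recurses: try each namespaced prefix (ImVector_, ImGuiStorage_), on a hit emit the
-- replacement + "_" and recurse on the remainder; otherwise strip the first of ImGui, Im.
def pvStripA (cs : List Char) : List Char :=
  if h1 : PySem.Chars.startswith cs "ImVector_".toList = true then
    "Vector".toList ++ "_".toList ++ pvStripA (cs.drop "ImVector_".toList.length)
  else if h2 : PySem.Chars.startswith cs "ImGuiStorage_".toList = true then
    "Storage".toList ++ "_".toList ++ pvStripA (cs.drop "ImGuiStorage_".toList.length)
  else if PySem.Chars.startswith cs "ImGui".toList then cs.drop "ImGui".toList.length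
  else if PySem.Chars.startswith cs "Im".toList then cs.drop "Im".toList.length
  else cs
termination_by cs.length
decreasing_by
  · exact pvDropLtOfStartswith cs _ h1 (by decide)
  · exact pvDropLtOfStartswith cs _ h2 (by decide)

def strip_imgui_branding (name : String) : String := String.ofList (pvStripA name.toList)

-- ===== PORT B =====
-- B's while-loop: accumulate replacements while a namespaced prefix matches, then stop.
def pvLoopB (acc cs : List Char) : List Char × List Char :=
  if h1 : PySem.Chars.startswith cs "ImVector_".toList = true then
    pvLoopB (acc ++ "Vector_".toList) (cs.drop "ImVector_".toList.length)
  else if h2 : PySem.Chars.startswith cs "ImGuiStorage_".toList = true then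
    pvLoopB (acc ++ "Storage_".toList) (cs.drop "ImGuiStorage_".toList.length)
  else (acc, cs)
termination_by cs.length
decreasing_by
  · exact pvDropLtOfStartswith cs _ h1 (by decide)
  · exact pvDropLtOfStartswith cs _ h2 (by decide)

-- B's post-loop single ImGui/Im strip
def pvImStripB (cs : List Char) : List Char :=
  if PySem.Chars.startswith cs "ImGui".toList then cs.drop "ImGui".toList.length
  else if PySem.Chars.startswith cs "Im".toList then cs.drop "Im".toList.length
  else cs

def strip_imgui_branding_alt (name : String) : String :=
  String.ofList ((pvLoopB [] name.toList).1 ++ pvImStripB (pvLoopB [] name.toList).2)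

-- ===== PRECONDITION & SPEC =====
def Spec_strip_imgui_branding (name : String) (out : String) : Prop := out = strip_imgui_branding_alt name
instance (name : String) (out : String) : Decidable (Spec_strip_imgui_branding name out) := by unfold Spec_strip_imgui_branding; infer_instance

-- ===== CLAIM (what is proved, stated in full; the proofs are below) =====
def Claim_equal_strip_imgui_branding : Prop := ∀ (name : String), Dom_strip_imgui_branding name → Spec_strip_imgui_branding name (strip_imgui_branding name)

-- ===== LEMMAS AND PROOFS =====

-- loop invariant (strong induction on the length bound n): the accumulator is only
-- appended to, and pvImStripB of the loop's rest reconstructs exactly A's recursive result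
theorem pvLoopB_invariant : ∀ (n : Nat) (cs : List Char), cs.length ≤ n → ∀ acc : List Char,
    (pvLoopB acc cs).1 ++ pvImStripB (pvLoopB acc cs).2 = acc ++ pvStripA cs := by
  intro n
  induction n with
  | zero =>
    intro cs hcs acc
    have hnil : cs = [] := List.eq_nil_of_length_eq_zero (Nat.le_zero.mp hcs)
    subst hnil
    rw [pvLoopB, dif_neg (by decide), dif_neg (by decide), pvStripA, dif_neg (by decide),
        dif_neg (by decide)]
    rfl
  | succ n ih =>
    intro cs hcs acc
    by_cases h1 : PySem.Chars.startswith cs "ImVector_".toList = true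
    · have hlt := pvDropLtOfStartswith cs "ImVector_".toList h1 (by decide)
      rw [pvLoopB, dif_pos h1, pvStripA, dif_pos h1, ih _ (by omega)]
      simp
    · by_cases h2 : PySem.Chars.startswith cs "ImGuiStorage_".toList = true
      · have hlt := pvDropLtOfStartswith cs "ImGuiStorage_".toList h2 (by decide)
        rw [pvLoopB, dif_neg h1, dif_pos h2, pvStripA, dif_neg h1, dif_pos h2, ih _ (by omega)]
        simp
      · rw [pvLoopB, dif_neg h1, dif_neg h2, pvStripA, dif_neg h1, dif_neg h2]
        rfl

-- ===== VERDICT (by name: the statement is the Claim_ definition above) =====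
theorem strip_imgui_branding_spec : Claim_equal_strip_imgui_branding := by
  intro name _
  unfold Spec_strip_imgui_branding strip_imgui_branding strip_imgui_branding_alt
  rw [pvLoopB_invariant name.toList.length name.toList le_rfl []]
  simp
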